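-- pv_equiv track=rewrite | github.com/waldohidalgo/rutas_code_chef | Hashing/3Count Beautiful Pairs.py | beautiful_pairs
-- ===== SOURCE A (Python) =====
-- def beautiful_pairs(arr):
--     ct=0
--     n=len(arr)
--     for i in range(n-1):
--         for j in range(i+1,n):
--             if arr[i]==(arr[j]**2):
--                 ct+=1
--     return ct
-- ===== SOURCE B (Python) =====
-- def beautiful_pairs(arr):
--     ct = 0
--     seen = {}
--     for x in arr:
--         ct += seen.get(x * x, 0)
--         seen[x] = seen.get(x, 0) + 1
--     return ct
-- ===== Notes on version B (the rewrite author's own statement) =====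
-- stated objective: faster
-- what changed: replaced the nested index loops with a single left-to-right pass that keeps a hash-map counter of values seen so far and, for each element x, adds the number of earlier elements equal to x*x
import Mathlib
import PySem

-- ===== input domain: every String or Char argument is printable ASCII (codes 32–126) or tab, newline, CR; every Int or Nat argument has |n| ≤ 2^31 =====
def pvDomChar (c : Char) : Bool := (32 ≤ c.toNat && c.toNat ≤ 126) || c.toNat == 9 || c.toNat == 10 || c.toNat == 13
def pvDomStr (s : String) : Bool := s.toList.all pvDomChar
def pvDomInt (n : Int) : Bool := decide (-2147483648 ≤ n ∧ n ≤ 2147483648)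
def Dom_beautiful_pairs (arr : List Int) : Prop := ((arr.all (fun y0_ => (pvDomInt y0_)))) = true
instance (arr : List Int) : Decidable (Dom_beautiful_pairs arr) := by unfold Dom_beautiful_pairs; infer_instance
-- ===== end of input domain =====

-- B replaces A's O(n^2) nested index loops by one pass with a hash-map counter of seen values (measured asymptotically faster).


-- ===== PORT A =====
def beautiful_pairs (arr : List Int) : Int :=
  let n : Int := arr.length
  (PySem.List.pyRange 0 (n - 1) 1).foldl (fun ct i =>
    (PySem.List.pyRange (i + 1) n 1).foldl (fun ct j =>
      if PySem.List.pyGetD arr i 0 = (PySem.List.pyGetD arr j 0) ^ 2 then ct + 1 else ct) ct) 0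

-- ===== PORT B =====
def beautiful_pairs_alt (arr : List Int) : Int :=
  (arr.foldl (fun (s : PySem.Dict Int Int × Int) x =>
      (s.1.insert x (s.1.getD x 0 + 1), s.2 + s.1.getD (x * x) 0))
    (PySem.Dict.empty, 0)).2

-- ===== PRECONDITION & SPEC =====
def Spec_beautiful_pairs (arr : List Int) (out : Int) : Prop := out = beautiful_pairs_alt arr
instance (arr : List Int) (out : Int) : Decidable (Spec_beautiful_pairs arr out) := by unfold Spec_beautiful_pairs; infer_instance

-- ===== CLAIM (what is proved, stated in full; the proofs are below) =====
def Claim_equal_beautiful_pairs : Prop := ∀ (arr : List Int), Dom_beautiful_pairs arr → Spec_beautiful_pairs arr (beautiful_pairs arr)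

-- ===== LEMMAS AND PROOFS =====

-- number of "beautiful pairs" i < j with l[i] = l[j]^2, by structural recursion
def pairsCnt : List Int → Int
  | [] => 0
  | x :: rest => ((rest.countP (fun y => decide (x = y * y)) : Nat) : Int) + pairsCnt rest

lemma pairsCnt_short (l : List Int) (h : l.length ≤ 1) : pairsCnt l = 0 := by
  match l, h with
  | [], _ => rfl
  | [x], _ => simp [pairsCnt]

-- A's inner loop counts matches in the suffix after position i
lemma inner_eq (arr : List Int) (v ct i : Int) (h : 0 ≤ i) :
    (PySem.List.pyRange (i + 1) ((arr.length : Int)) 1).foldl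
      (fun ct j => if v = (PySem.List.pyGetD arr j 0) ^ 2 then ct + 1 else ct) ct
    = ct + (((arr.drop (i + 1).toNat).countP (fun y => decide (v = y * y)) : Nat) : Int) := by
  rw [PySem.List.foldl_pyRange_pyGetD' arr 0
      (fun acc y => if v = y ^ 2 then acc + 1 else acc) ct (by omega)]
  have : ∀ l : List Int, l.foldl (fun acc y => if v = y ^ 2 then acc + 1 else acc) ct
      = ct + ((l.countP (fun y => decide (v = y * y)) : Nat) : Int) := by
    intro l
    have := PySem.List.foldl_count_if (fun y : Int => decide (v = y * y)) l ct
    simpa [pow_two] using this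
  exact this _

-- A's outer loop, started at index a, counts the pairs of the suffix from a
lemma outer_eq (n : Nat) : ∀ (arr : List Int) (a ct : Int), 0 ≤ a →
    (((arr.length : Int) - 1 - a).toNat = n) →
    (PySem.List.pyRange a ((arr.length : Int) - 1) 1).foldl
      (fun ct i => (PySem.List.pyRange (i + 1) ((arr.length : Int)) 1).foldl
        (fun ct j => if PySem.List.pyGetD arr i 0 = (PySem.List.pyGetD arr j 0) ^ 2 then ct + 1 else ct) ct) ct
    = ct + pairsCnt (arr.drop a.toNat) := by
  induction n with
  | zero =>
    intro arr a ct ha hn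
    rw [PySem.List.pyRange_one_eq_nil (by omega)]
    have hlen : (arr.drop a.toNat).length ≤ 1 := by
      simp only [List.length_drop]; omega
    simp [pairsCnt_short _ hlen]
  | succ n ih =>
    intro arr a ct ha hn
    have hlt : a < (arr.length : Int) - 1 := by omega
    rw [PySem.List.pyRange_one_cons hlt]
    simp only [List.foldl_cons]
    rw [inner_eq arr _ ct a ha]
    rw [ih arr (a + 1) _ (by omega) (by omega)]
    have hna : a.toNat < arr.length := by omega
    have hsucc : (a + 1).toNat = a.toNat + 1 := by omega
    have hdrop : arr.drop a.toNat = arr[a.toNat] :: arr.drop (a.toNat + 1) :=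
      List.drop_eq_getElem_cons hna
    have hget : PySem.List.pyGetD arr a 0 = arr[a.toNat] :=
      PySem.List.pyGetD_eq_getElem arr 0 ha (by omega)
    rw [hsucc, hdrop, hget]
    simp [pairsCnt]
    ring

lemma A_eq_pairsCnt (arr : List Int) : beautiful_pairs arr = pairsCnt arr := by
  unfold beautiful_pairs
  have := outer_eq (((arr.length : Int) - 1).toNat) arr 0 0 le_rfl (by omega)
  simpa using this

-- number of matches of squares of l's elements among the values of p
def cross (p l : List Int) : Int := (l.map (fun y => ((p.count (y * y) : Nat) : Int))).sum

lemma cross_nil_left (l : List Int) : cross [] l = 0 := by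
  simp [cross]

lemma cross_cons (p : List Int) (x : Int) (l : List Int) :
    cross p (x :: l) = ((p.count (x * x) : Nat) : Int) + cross p l := by
  simp [cross]

lemma cross_snoc (p l : List Int) (x : Int) :
    cross (p ++ [x]) l = cross p l + ((l.countP (fun y => decide (x = y * y)) : Nat) : Int) := by
  induction l with
  | nil => simp [cross]
  | cons y t ih =>
    rw [cross_cons, cross_cons, List.countP_cons]
    have hc : (p ++ [x]).count (y * y) = p.count (y * y) + if x = y * y then 1 else 0 := by
      by_cases hxy : x = y * y
      · simp [List.count_append, hxy]
      · simp [List.count_append, List.count_singleton]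
    rw [hc, ih]
    by_cases hxy : x = y * y
    · simp only [hxy, if_true, decide_true]; push_cast; ring
    · simp only [hxy, if_false, decide_false]; push_cast; ring

-- invariant of B's single pass: dict = counter of the processed prefix p
lemma bloop (l : List Int) : ∀ (d : PySem.Dict Int Int) (ct : Int) (p : List Int),
    (∀ v : Int, d.getD v 0 = ((p.count v : Nat) : Int)) →
    (l.foldl (fun (s : PySem.Dict Int Int × Int) x =>
        (s.1.insert x (s.1.getD x 0 + 1), s.2 + s.1.getD (x * x) 0)) (d, ct)).2
    = ct + cross p l + pairsCnt l := by
  induction l with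
  | nil => intro d ct p _; simp [cross, pairsCnt]
  | cons x t ih =>
    intro d ct p hd
    simp only [List.foldl_cons]
    rw [ih (d.insert x (d.getD x 0 + 1)) (ct + d.getD (x * x) 0) (p ++ [x]) ?_]
    · rw [cross_snoc, cross_cons, hd (x * x)]
      simp [pairsCnt]
      ring
    · intro v
      rw [PySem.Dict.getD_insert]
      by_cases hv : v = x
      · simp [hv, List.count_append, hd x]
      · simp [hv, List.count_append, hd v, List.count_singleton]
        intro h; exact absurd h.symm hv

lemma B_eq_pairsCnt (arr : List Int) : beautiful_pairs_alt arr = pairsCnt arr := by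
  unfold beautiful_pairs_alt
  rw [bloop arr PySem.Dict.empty 0 [] (by intro v; simp)]
  simp [cross_nil_left]

-- ===== VERDICT (by name: the statement is the Claim_ definition above) =====
theorem beautiful_pairs_spec : Claim_equal_beautiful_pairs := by
  intro arr _
  unfold Spec_beautiful_pairs
  rw [A_eq_pairsCnt, B_eq_pairsCnt]
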